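-- pv_equiv track=rewrite | github.com/RafSardarian/SpecOPS | sum(1..100).py | one_hundred2
-- ===== SOURCE A (Python) =====
-- def one_hundred2(n):
--     i = 0
--     summa = 0
--     result = 0
--     while i <= n:
--         summa = i
--         summa = summa ** 2
--         result += summa
--         i += 1
--     return result
-- ===== SOURCE B (Python) =====
-- def one_hundred2(n):
--     if n < 0:
--         return 0
--     return n * (n + 1) * (2 * n + 1) // 6
-- ===== Notes on version B (the rewrite author's own statement) =====
-- stated objective: faster
-- what changed: Replaces the O(n) while-loop accumulating i**2 with the closed-form formula n(n+1)(2n+1)//6 (0 for negative n).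
import Mathlib
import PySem

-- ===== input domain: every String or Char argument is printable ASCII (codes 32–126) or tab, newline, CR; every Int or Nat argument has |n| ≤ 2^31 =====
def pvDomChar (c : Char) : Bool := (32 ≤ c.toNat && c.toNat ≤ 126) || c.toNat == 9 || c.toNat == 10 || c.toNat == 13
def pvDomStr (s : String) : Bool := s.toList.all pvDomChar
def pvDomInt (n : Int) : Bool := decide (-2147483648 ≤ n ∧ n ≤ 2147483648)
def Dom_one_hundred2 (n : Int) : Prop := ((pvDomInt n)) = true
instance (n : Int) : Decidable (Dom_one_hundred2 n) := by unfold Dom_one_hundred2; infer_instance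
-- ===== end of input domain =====

-- B replaces A's O(n) accumulation loop with the closed-form n(n+1)(2n+1)//6 (0 for n < 0): asymptotically faster.


-- ===== PORT A =====
-- the while-loop: state (i, result); summa is recomputed each iteration as i ** 2
def one_hundred2_loop (n i result : Int) : Int :=
  if i ≤ n then one_hundred2_loop n (i + 1) (result + i ^ 2) else result
termination_by (n + 1 - i).toNat
decreasing_by omega

def one_hundred2 (n : Int) : Int := one_hundred2_loop n 0 0

-- ===== PORT B =====
def one_hundred2_alt (n : Int) : Int :=
  if n < 0 then 0 else PySem.Int.floordiv (n * (n + 1) * (2 * n + 1)) 6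

-- ===== PRECONDITION & SPEC =====
def Spec_one_hundred2 (n : Int) (out : Int) : Prop := out = one_hundred2_alt n
instance (n : Int) (out : Int) : Decidable (Spec_one_hundred2 n out) := by unfold Spec_one_hundred2; infer_instance

-- ===== CLAIM (what is proved, stated in full; the proofs are below) =====
def Claim_equal_one_hundred2 : Prop := ∀ (n : Int), Dom_one_hundred2 n → Spec_one_hundred2 n (one_hundred2 n)

-- ===== LEMMAS AND PROOFS =====
-- g m = m(m+1)(2m+1); the loop from i with k+ remaining steps satisfies 6·loop = 6·r + g(i+k) − g(i−1)
lemma one_hundred2_loop_key : ∀ (k : Nat) (i r : Int),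
    6 * one_hundred2_loop (i + (k : Int)) i r
      = 6 * r + ((i + k) * (i + k + 1) * (2 * (i + k) + 1) - (i - 1) * i * (2 * (i - 1) + 1)) := by
  intro k
  induction k with
  | zero =>
    intro i r
    rw [one_hundred2_loop, if_pos (by omega), one_hundred2_loop, if_neg (by omega)]
    push_cast
    ring
  | succ k ih =>
    intro i r
    rw [one_hundred2_loop, if_pos (by omega)]
    have h : i + ((k : Int) + 1) = (i + 1) + (k : Int) := by ring
    push_cast
    rw [h, ih (i + 1) (r + i ^ 2)]
    ring

lemma one_hundred2_loop_neg (n : Int) (h : n < 0) : one_hundred2_loop n 0 0 = 0 := by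
  rw [one_hundred2_loop, if_neg (by omega)]

-- ===== VERDICT (by name: the statement is the Claim_ definition above) =====
theorem one_hundred2_spec : Claim_equal_one_hundred2 := by
  intro n _
  unfold Spec_one_hundred2 one_hundred2 one_hundred2_alt
  by_cases hn : n < 0
  · rw [if_pos hn, one_hundred2_loop_neg n hn]
  · rw [if_neg hn]
    have hk : n = 0 + ((n.toNat : Nat) : Int) := by omega
    have h6 : 6 * one_hundred2_loop n 0 0 = n * (n + 1) * (2 * n + 1) := by
      calc 6 * one_hundred2_loop n 0 0
          = 6 * one_hundred2_loop (0 + ((n.toNat : Nat) : Int)) 0 0 := by rw [← hk]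
        _ = n * (n + 1) * (2 * n + 1) := by
            rw [one_hundred2_loop_key n.toNat 0 0]
            have : ((n.toNat : Nat) : Int) = n := by omega
            rw [this]; ring
    rw [← h6, PySem.Int.floordiv_eq_ediv_of_pos (by norm_num)]
    omega
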